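-- pv_equiv track=rewrite | github.com/MichelangeloSorice/ermes-thesis | dynamicSectionsDetectionTool/clsf2_searchAndAssignPatterns.py | searchPatterns
-- ===== SOURCE A (Python) =====
-- def searchPatterns(blockComparisons, width, height, maxWidth):
--     # Searching for pattern
--     patternCounter = 0
--     limit = maxWidth * (height[1] - height[0])
--     for x in range(width[0], width[1]):
--         previousBlock = blockComparisons[x]
--         if previousBlock is True:
--             verticalCountStatic = 0
--             verticalCountDynamic = 1
--             state = 0  # Dynamic Block Found
--         else:
--             verticalCountStatic = 1
--             verticalCountDynamic = 0
--             state = 1  # Static Block Found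
--         for i in range(x + maxWidth, limit, maxWidth):
--             if blockComparisons[i] is True and state == 0:
--                 verticalCountDynamic += 1
--                 verticalCountStatic = 0
--                 state = 0
--             if blockComparisons[i] is True and state == 1:
--                 verticalCountStatic = 0
--                 verticalCountDynamic = 1
--                 state = 0
--             if blockComparisons[i] is True and state == 2:
--                 verticalCountDynamic = 1
--                 verticalCountStatic = 0
--                 state = 0
--             if blockComparisons[i] is False and state == 0:
--                 verticalCountStatic = 1
--                 state = 2
--             if blockComparisons[i] is False and state == 1:
--                 state = 1
--             if blockComparisons[i] is False and state == 2:
--                 verticalCountStatic += 1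
--                 state = 2
--         if state == 2 and verticalCountStatic >= 8 and verticalCountDynamic > 4:
--             patternCounter += 1
--             if patternCounter == 6:
--                 return True
--         else:
--             patternCounter = 0
--
--     return False
-- ===== SOURCE B (Python) =====
-- def searchPatterns(blockComparisons, width, height, maxWidth):
--     # Reverse-scan re-implementation: a column matches iff its trailing False
--     # run has length >= 7 and the True run immediately before it has length >= 5
--     # (A's sequential ifs double-count the first False after a True, hence 7 not 8).
--     limit = maxWidth * (height[1] - height[0])
--     patternCounter = 0
--     for x in range(width[0], width[1]):
--         col = [blockComparisons[x]]
--         for i in range(x + maxWidth, limit, maxWidth):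
--             col.append(blockComparisons[i])
--         rev = col[::-1]
--         f = 0
--         for b in rev:
--             if b is False:
--                 f += 1
--             else:
--                 break
--         t = 0
--         for b in rev[f:]:
--             if b is True:
--                 t += 1
--             else:
--                 break
--         if f >= 7 and t >= 5:
--             patternCounter += 1
--             if patternCounter == 6:
--                 return True
--         else:
--             patternCounter = 0
--     return False
-- ===== Notes on version B (the rewrite author's own statement) =====
-- stated objective: simpler
-- what changed: Replaces A's six-branch forward state machine per column with a reverse scan of the column that counts the trailing False run and the True run just before it, matching iff they are >= 7 and >= 5 (7 not 8 because A's sequential ifs double-increment on the first False after a True).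
import Mathlib
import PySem

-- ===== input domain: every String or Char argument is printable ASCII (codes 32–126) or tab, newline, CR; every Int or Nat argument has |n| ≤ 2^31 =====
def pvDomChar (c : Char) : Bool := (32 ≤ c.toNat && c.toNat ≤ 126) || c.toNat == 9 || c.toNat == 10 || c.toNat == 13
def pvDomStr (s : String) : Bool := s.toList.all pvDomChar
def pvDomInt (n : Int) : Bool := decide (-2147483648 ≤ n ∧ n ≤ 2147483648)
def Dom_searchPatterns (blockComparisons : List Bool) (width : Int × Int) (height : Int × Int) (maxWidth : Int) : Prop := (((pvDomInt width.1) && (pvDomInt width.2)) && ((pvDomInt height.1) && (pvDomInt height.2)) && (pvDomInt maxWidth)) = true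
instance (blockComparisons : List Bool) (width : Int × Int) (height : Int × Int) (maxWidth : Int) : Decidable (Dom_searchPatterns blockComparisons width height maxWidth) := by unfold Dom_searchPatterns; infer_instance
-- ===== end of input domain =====

-- B replaces A's six-branch forward state machine per column by a reverse scan counting
-- the trailing False run and the True run before it (objective: simpler; same cost).

-- ===== PORT A =====
-- blockComparisons[i]; Pre_ guarantees Raise.InRange, under which the default is never used
def pvGetB (bc : List Bool) (i : Int) : Bool := PySem.List.pyGetD bc i false

-- the six sequential ifs of A's inner loop body; t = (verticalCountStatic, verticalCountDynamic, state)
def pvAStepVal (t : Int × Int × Int) (b : Bool) : Int × Int × Int :=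
  let t := if b = true ∧ t.2.2 = 0 then ((0 : Int), t.2.1 + 1, (0 : Int)) else t
  let t := if b = true ∧ t.2.2 = 1 then ((0 : Int), (1 : Int), (0 : Int)) else t
  let t := if b = true ∧ t.2.2 = 2 then ((0 : Int), (1 : Int), (0 : Int)) else t
  let t := if b = false ∧ t.2.2 = 0 then ((1 : Int), t.2.1, (2 : Int)) else t
  let t := if b = false ∧ t.2.2 = 1 then t else t
  let t := if b = false ∧ t.2.2 = 2 then (t.1 + 1, t.2.1, (2 : Int)) else t
  t

def pvAStep (bc : List Bool) (t : Int × Int × Int) (i : Int) : Int × Int × Int :=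
  pvAStepVal t (pvGetB bc i)

-- the outer 'for x in range(width[0], width[1])' with patternCounter and early return
def pvALoop (bc : List Bool) (mW limit : Int) : List Int → Int → Bool
  | [], _ => false
  | x :: xs, pc =>
    let t0 : Int × Int × Int := if pvGetB bc x = true then (0, 1, 0) else (1, 0, 1)
    let t := (PySem.List.pyRange (x + mW) limit mW).foldl (pvAStep bc) t0
    if t.2.2 = 2 ∧ t.1 ≥ 8 ∧ t.2.1 > 4 then
      if pc + 1 = 6 then true else pvALoop bc mW limit xs (pc + 1)
    else pvALoop bc mW limit xs 0

def searchPatterns (blockComparisons : List Bool) (width : Int × Int) (height : Int × Int) (maxWidth : Int) : Bool :=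
  pvALoop blockComparisons maxWidth (maxWidth * (height.2 - height.1))
    (PySem.List.pyRange width.1 width.2 1) 0

-- ===== PORT B =====
-- column matcher: reverse, count leading Falses f, then leading Trues t of the rest
def pvColMatch (col : List Bool) : Bool :=
  let rev := col.reverse
  let f := (rev.takeWhile (fun b => !b)).length
  let t := ((rev.drop f).takeWhile (fun b => b)).length
  decide (7 ≤ f ∧ 5 ≤ t)

def pvBLoop (bc : List Bool) (mW limit : Int) : List Int → Int → Bool
  | [], _ => false
  | x :: xs, pc =>
    let col := pvGetB bc x :: (PySem.List.pyRange (x + mW) limit mW).map (pvGetB bc)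
    if pvColMatch col then
      if pc + 1 = 6 then true else pvBLoop bc mW limit xs (pc + 1)
    else pvBLoop bc mW limit xs 0

def searchPatterns_alt (blockComparisons : List Bool) (width : Int × Int) (height : Int × Int) (maxWidth : Int) : Bool :=
  pvBLoop blockComparisons maxWidth (maxWidth * (height.2 - height.1))
    (PySem.List.pyRange width.1 width.2 1) 0

-- ===== PRECONDITION & SPEC =====
-- Pre_: holds exactly when Python A raises no exception (ValueError for step 0 reached
-- only when the outer loop runs; IndexError for an accessed index outside [-len, len)).
-- Stated in closed form: bounds for the outer indices, and for the inner ranges only the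
-- first min(width span, |maxWidth|) columns matter (later columns access a subset), with the
-- extreme accessed index of each given by a floor-mod residue formula.
def Pre_searchPatterns (blockComparisons : List Bool) (width : Int × Int) (height : Int × Int) (maxWidth : Int) : Prop :=
  width.1 < width.2 →
    (-(blockComparisons.length : Int) ≤ width.1 ∧ width.2 ≤ (blockComparisons.length : Int) ∧ maxWidth ≠ 0 ∧
     ∀ x ∈ (if maxWidth > 0 then PySem.List.pyRange width.1 (min width.2 (width.1 + maxWidth)) 1
            else PySem.List.pyRange (max width.1 (width.2 + maxWidth)) width.2 1),
       (maxWidth > 0 → x + maxWidth < maxWidth * (height.2 - height.1) →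
          (-(blockComparisons.length : Int) ≤ x + maxWidth ∧
           maxWidth * (height.2 - height.1) - 1 -
             PySem.Int.mod (maxWidth * (height.2 - height.1) - 1 - (x + maxWidth)) maxWidth
             < (blockComparisons.length : Int))) ∧
       (maxWidth < 0 → x + maxWidth > maxWidth * (height.2 - height.1) →
          (x + maxWidth < (blockComparisons.length : Int) ∧
           -(blockComparisons.length : Int) ≤ maxWidth * (height.2 - height.1) + 1 +
             PySem.Int.mod (x + maxWidth - (maxWidth * (height.2 - height.1) + 1)) (-maxWidth))))

instance (blockComparisons : List Bool) (width : Int × Int) (height : Int × Int) (maxWidth : Int) : Decidable (Pre_searchPatterns blockComparisons width height maxWidth) := by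
  unfold Pre_searchPatterns; infer_instance

def pvWitness_searchPatterns : List Bool × (Int × Int) × (Int × Int) × Int :=
  ([true], (0, 1), (0, 1), 1)

def Spec_searchPatterns (blockComparisons : List Bool) (width : Int × Int) (height : Int × Int) (maxWidth : Int) (out : Bool) : Prop := out = searchPatterns_alt blockComparisons width height maxWidth
instance (blockComparisons : List Bool) (width : Int × Int) (height : Int × Int) (maxWidth : Int) (out : Bool) : Decidable (Spec_searchPatterns blockComparisons width height maxWidth out) := by unfold Spec_searchPatterns; infer_instance

-- ===== CLAIM (what is proved, stated in full; the proofs are below) =====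
def Claim_equal_searchPatterns : Prop := ∀ (blockComparisons : List Bool) (width : Int × Int) (height : Int × Int) (maxWidth : Int), Dom_searchPatterns blockComparisons width height maxWidth → Pre_searchPatterns blockComparisons width height maxWidth → Spec_searchPatterns blockComparisons width height maxWidth (searchPatterns blockComparisons width height maxWidth)

-- ===== LEMMAS AND PROOFS =====

-- trailing-run counters on the REVERSED processed prefix r
def pvTF (r : List Bool) : Nat := (r.takeWhile (fun b => !b)).length
def pvTT (r : List Bool) : Nat := ((r.drop (pvTF r)).takeWhile (fun b => b)).length

-- the state-machine triple as a function of the reversed processed prefix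
def pvF (r : List Bool) : Int × Int × Int :=
  if pvTF r = 0 then ((0 : Int), (pvTT r : Int), 0)
  else if pvTT r = 0 then (1, 0, 1)
  else ((pvTF r : Int) + 1, (pvTT r : Int), 2)

theorem pvStep_F (r : List Bool) (hr : r ≠ []) (b : Bool) :
    pvAStepVal (pvF r) b = pvF (b :: r) := by
  obtain ⟨a, r', rfl⟩ := List.exists_cons_of_ne_nil hr
  cases b <;> cases a <;>
    simp [pvAStepVal, pvF, pvTF, pvTT, List.takeWhile] <;>
    split_ifs <;> simp_all

theorem pvFold_F (l : List Bool) : ∀ r : List Bool, r ≠ [] →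
    List.foldl pvAStepVal (pvF r) l = pvF (l.reverse ++ r) := by
  induction l with
  | nil => intro r hr; simp
  | cons b l ih =>
    intro r hr
    have h1 : List.foldl pvAStepVal (pvF r) (b :: l)
        = List.foldl pvAStepVal (pvF (b :: r)) l := by
      simp [List.foldl_cons, pvStep_F r hr b]
    rw [h1, ih (b :: r) (by simp)]
    simp

theorem pvMatch_F (r : List Bool) :
    ((pvF r).2.2 = 2 ∧ (pvF r).1 ≥ 8 ∧ (pvF r).2.1 > 4) ↔ (7 ≤ pvTF r ∧ 5 ≤ pvTT r) := by
  unfold pvF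
  split_ifs <;> simp <;> omega

theorem pvColMatch_eq (col : List Bool) :
    pvColMatch col = decide (7 ≤ pvTF col.reverse ∧ 5 ≤ pvTT col.reverse) := rfl

theorem pvInit_F (b : Bool) :
    (if b = true then ((0 : Int), (1 : Int), (0 : Int)) else (1, 0, 1)) = pvF [b] := by
  cases b <;> rfl

theorem pvCol_triple (bc : List Bool) (x mW limit : Int) :
    (PySem.List.pyRange (x + mW) limit mW).foldl (pvAStep bc)
      (if pvGetB bc x = true then ((0 : Int), (1 : Int), (0 : Int)) else (1, 0, 1))
    = pvF (pvGetB bc x :: (PySem.List.pyRange (x + mW) limit mW).map (pvGetB bc)).reverse := by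
  rw [pvInit_F]
  have hmap : (PySem.List.pyRange (x + mW) limit mW).foldl (pvAStep bc) (pvF [pvGetB bc x])
      = List.foldl pvAStepVal (pvF [pvGetB bc x])
          ((PySem.List.pyRange (x + mW) limit mW).map (pvGetB bc)) := by
    rw [List.foldl_map]; rfl
  rw [hmap, pvFold_F _ [pvGetB bc x] (by simp)]
  simp

theorem pvLoop_eq (bc : List Bool) (mW limit : Int) (xs : List Int) : ∀ pc : Int,
    pvALoop bc mW limit xs pc = pvBLoop bc mW limit xs pc := by
  induction xs with
  | nil => intro pc; rfl
  | cons x xs ih =>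
    intro pc
    show pvALoop bc mW limit (x :: xs) pc = pvBLoop bc mW limit (x :: xs) pc
    rw [pvALoop, pvBLoop]
    have hc := pvCol_triple bc x mW limit
    simp only [List.reverse_cons] at hc
    by_cases h : pvColMatch (pvGetB bc x :: (PySem.List.pyRange (x + mW) limit mW).map (pvGetB bc)) = true
    · have hA := (pvMatch_F _).mpr (by simpa [pvColMatch_eq] using h)
      rw [← hc] at hA
      rw [if_pos hA, if_pos h]
      split <;> [rfl; exact ih _]
    · have hA : ¬ ((List.foldl (pvAStep bc)
          (if pvGetB bc x = true then ((0 : Int), (1 : Int), (0 : Int)) else (1, 0, 1))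
          (PySem.List.pyRange (x + mW) limit mW)).2.2 = 2 ∧
          (List.foldl (pvAStep bc)
          (if pvGetB bc x = true then ((0 : Int), (1 : Int), (0 : Int)) else (1, 0, 1))
          (PySem.List.pyRange (x + mW) limit mW)).1 ≥ 8 ∧
          (List.foldl (pvAStep bc)
          (if pvGetB bc x = true then ((0 : Int), (1 : Int), (0 : Int)) else (1, 0, 1))
          (PySem.List.pyRange (x + mW) limit mW)).2.1 > 4) := by
        rw [hc]
        intro hm
        exact h (by simpa [pvColMatch_eq] using (pvMatch_F _).mp hm)
      rw [if_neg hA, if_neg h]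
      exact ih 0

-- ===== VERDICT (by name: the statement is the Claim_ definition above) =====
theorem searchPatterns_spec : Claim_equal_searchPatterns := by
  intro bc w h mW _ _
  unfold Spec_searchPatterns searchPatterns searchPatterns_alt
  exact pvLoop_eq bc mW (mW * (h.2 - h.1)) (PySem.List.pyRange w.1 w.2 1) 0
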